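-- pv_equiv track=rewrite | github.com/AnEpicDoor/Data-Structures-and-Algorithms | main.py | algorithm_h
-- ===== SOURCE A (Python) =====
-- def algorithm_h(array):
--
--     # n = length of array
--     n = len(array)
--
--     # initialise minimum difference to infinity
--     min_diff = float('inf')
--
--     # initialise variables to store subsets with minimum difference
--     min_s1 = []
--     min_s2 = []
--
--     # iterate through all 2-way partitions of array
--     for i in range(n):
--         for j in range(i + 1, n):
--
--             # subset 1 is the slice of the array from index i to index j
--             s1 = array[i:j]
--
--             # subset 2 contains all the elements not in s1
--             s2 = [x for x in array if x not in s1]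
--
--             # find absolute difference between subset 1 and subset 2
--             diff = abs(sum(s1) - sum(s2))
--
--             # update minimum difference and smallest partition if necessary
--             if diff < min_diff:
--                 min_diff = diff
--                 min_s1 = s1
--                 min_s2 = s2
--
--     # return the ideal subsets
--     return min_s1, min_s2
-- ===== SOURCE B (Python) =====
-- def algorithm_h(array):
--     # One O(n) pass per slice-start: grow the slice rightward, keeping the slice sum,
--     # the set of values in the slice, and the sum of excluded elements incrementally.
--     n = len(array)
--     total = sum(array)
--     count = {}
--     for x in array:
--         count[x] = count.get(x, 0) + 1
--     best = None  # (diff, i, j) -- first strict minimum in (i, j) order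
--     for i in range(n):
--         seen = set()
--         excluded = total
--         s1sum = 0
--         for j in range(i + 1, n):
--             e = array[j - 1]
--             s1sum += e
--             if e not in seen:
--                 seen.add(e)
--                 excluded -= count[e] * e
--             diff = abs(s1sum - excluded)
--             if best is None or diff < best[0]:
--                 best = (diff, i, j)
--     if best is None:
--         return [], []
--     _, i, j = best
--     s1 = array[i:j]
--     sset = set(s1)
--     s2 = [x for x in array if x not in sset]
--     return s1, s2
-- ===== Notes on version B (the rewrite author's own statement) =====
-- stated objective: faster
-- what changed: A rebuilds each slice and re-filters the whole array for every (i,j) pair (O(n^4)); B keeps a running slice sum plus an incremental value-set and excluded-sum while growing each slice, picking the best (i,j) in O(n^2) and materialising the two subsets once at the end.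
import Mathlib
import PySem

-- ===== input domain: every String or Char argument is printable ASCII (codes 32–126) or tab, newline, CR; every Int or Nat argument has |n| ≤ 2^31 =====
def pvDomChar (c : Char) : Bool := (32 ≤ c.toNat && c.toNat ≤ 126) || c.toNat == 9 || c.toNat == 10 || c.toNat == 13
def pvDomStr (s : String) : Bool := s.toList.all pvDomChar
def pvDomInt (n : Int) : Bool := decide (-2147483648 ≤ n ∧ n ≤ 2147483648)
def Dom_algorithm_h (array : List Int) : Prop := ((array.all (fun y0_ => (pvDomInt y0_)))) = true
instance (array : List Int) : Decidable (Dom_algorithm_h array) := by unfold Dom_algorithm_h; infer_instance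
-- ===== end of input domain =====

-- B replaces A's re-scan of every slice by an O(n^2) sweep: a running slice sum plus an
-- incremental value-set / excluded-sum while growing each slice (objective: faster).


-- ===== PORT A =====
-- float('inf') is only a "no candidate yet" sentinel: ported as `none` in an Option Int
-- (the first candidate always satisfies diff < inf, exactly as `none` always loses here).
def algorithm_h (array : List Int) : List Int × List Int :=
  let n : Int := array.length
  let r := (PySem.List.pyRange 0 n 1).foldl (fun st i =>
      (PySem.List.pyRange (i+1) n 1).foldl (fun st j =>
        let s1 := PySem.List.slice array (some i) (some j)
        let s2 := array.filter (fun x => !(s1.contains x))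
        let diff := |s1.sum - s2.sum|
        match st.1 with
        | none => (some diff, s1, s2)
        | some m => if diff < m then (some diff, s1, s2) else st) st)
    ((none, [], []) : Option Int × List Int × List Int)
  (r.2.1, r.2.2)

-- ===== PORT B =====
def algorithm_h_alt (array : List Int) : List Int × List Int :=
  let n : Int := array.length
  let total := array.sum
  let count := array.foldl (fun d x => d.insert x (d.getD x 0 + 1))
    (PySem.Dict.empty : PySem.Dict Int Int)
  let best := (PySem.List.pyRange 0 n 1).foldl (fun best i =>
      ((PySem.List.pyRange (i+1) n 1).foldl (fun st j =>
        let e := PySem.List.pyGetD array (j-1) 0   -- array[j-1]; j-1 is always in range here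
        let s1sum := st.2.2.2 + e
        let se : PySem.Set Int × Int :=
          if PySem.Set.contains st.2.1 e then (st.2.1, st.2.2.1)
          else (PySem.Set.add st.2.1 e, st.2.2.1 - count.getD e 0 * e)
        let diff := |s1sum - se.2|
        let best' : Option (Int × Int × Int) :=
          match st.1 with
          | none => some (diff, i, j)
          | some b => if diff < b.1 then some (diff, i, j) else st.1
        (best', se.1, se.2, s1sum))
        (best, (PySem.Set.empty : PySem.Set Int), total, (0 : Int))).1)
    (none : Option (Int × Int × Int))
  match best with
  | none => ([], [])
  | some b =>
    let s1 := PySem.List.slice array (some b.2.1) (some b.2.2)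
    let sset := PySem.Set.ofList s1
    let s2 := array.filter (fun x => !(PySem.Set.contains sset x))
    (s1, s2)

-- ===== PRECONDITION & SPEC =====
def Spec_algorithm_h (array : List Int) (out : List Int × List Int) : Prop := out = algorithm_h_alt array
instance (array : List Int) (out : List Int × List Int) : Decidable (Spec_algorithm_h array out) := by unfold Spec_algorithm_h; infer_instance

-- ===== CLAIM (what is proved, stated in full; the proofs are below) =====
def Claim_equal_algorithm_h : Prop := ∀ (array : List Int), Dom_algorithm_h array → Spec_algorithm_h array (algorithm_h array)

-- ===== LEMMAS AND PROOFS =====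

-- the slice array[i:j]
def pvSl (array : List Int) (i j : Int) : List Int := PySem.List.slice array (some i) (some j)
-- sum of the elements of `array` whose value does not occur in `s`
def pvEx (array s : List Int) : Int := (array.filter (fun x => !(s.contains x))).sum
-- the quantity A minimises, as a function of the pair (i, j)
def pvD (array : List Int) (i j : Int) : Int :=
  |(pvSl array i j).sum - pvEx array (pvSl array i j)|
-- abstract selection step: keep the first pair attaining the strict minimum of pvD
def pvSel (array : List Int) (b : Option (Int × Int)) (i j : Int) : Option (Int × Int) :=
  match b with
  | none => some (i, j)
  | some p => if pvD array i j < pvD array p.1 p.2 then some (i, j) else b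
-- A's loop state as a function of the abstract state
def pvF (array : List Int) (b : Option (Int × Int)) : Option Int × List Int × List Int :=
  match b with
  | none => (none, [], [])
  | some p => (some (pvD array p.1 p.2), pvSl array p.1 p.2,
      array.filter (fun x => !((pvSl array p.1 p.2).contains x)))
-- B's best as a function of the abstract state
def pvH (array : List Int) (b : Option (Int × Int)) : Option (Int × Int × Int) :=
  match b with
  | none => none
  | some p => some (pvD array p.1 p.2, p.1, p.2)

theorem pv_count (array : List Int) (v : Int) :
    (array.foldl (fun d x => d.insert x (d.getD x 0 + 1))
      (PySem.Dict.empty : PySem.Dict Int Int)).getD v 0 = array.count v := by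
  suffices h : ∀ (d : PySem.Dict Int Int),
      (array.foldl (fun d x => d.insert x (d.getD x 0 + 1)) d).getD v 0
        = d.getD v 0 + array.count v by
    simpa using h PySem.Dict.empty
  induction array with
  | nil => simp
  | cons x xs ih =>
    intro d
    simp only [List.foldl_cons, ih, PySem.Dict.getD_insert, List.count_cons]
    by_cases h : v = x <;> simp [h] <;> omega

theorem pv_sl_empty (array : List Int) (i j : Int) (h0 : 0 ≤ i) (h : j ≤ i) (h0' : 0 ≤ j) :
    pvSl array i j = [] := by
  unfold pvSl
  rw [PySem.List.slice_toNat array h0 h0']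
  simp; omega

theorem pv_sl_snoc (array : List Int) (i m : Int) (h0 : 0 ≤ i) (h1 : i ≤ m)
    (h2 : m < (array.length : Int)) :
    pvSl array i (m + 1) = pvSl array i m ++ [PySem.List.pyGetD array m 0] := by
  unfold pvSl
  rw [PySem.List.slice_toNat array h0 (by omega), PySem.List.slice_toNat array h0 (by omega),
    PySem.List.pyGetD_eq_getElem array 0 (by omega) h2]
  have hm : (m+1).toNat - i.toNat = (m.toNat - i.toNat) + 1 := by omega
  rw [hm, List.take_add_one]
  congr 1
  rw [List.getElem?_drop]
  have : i.toNat + (m.toNat - i.toNat) = m.toNat := by omega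
  rw [this, List.getElem?_eq_getElem (by omega)]
  rfl

theorem pv_sum_filter_ne (l : List Int) (e : Int) :
    (l.filter (fun x => !decide (x = e))).sum = l.sum - l.count e * e := by
  induction l with
  | nil => simp
  | cons y ys ih =>
    simp only [List.filter_cons, List.count_cons]
    by_cases h : y = e
    · subst h; simp [ih]; ring
    · simp [h, ih]; ring

theorem pv_ex_snoc (array s : List Int) (e : Int) (he : e ∉ s) :
    pvEx array (s ++ [e]) = pvEx array s - array.count e * e := by
  unfold pvEx
  have h1 : (fun x => !((s ++ [e]).contains x))
      = (fun x : Int => (!decide (x = e)) && (!(s.contains x))) := by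
    funext x
    by_cases hx : x ∈ s <;> by_cases hxe : x = e <;> simp [hx, hxe]
  rw [h1, ← List.filter_filter, pv_sum_filter_ne]
  congr 1
  rw [List.count_filter (by simpa using he)]

theorem pv_ex_snoc_mem (array s : List Int) (e : Int) (he : e ∈ s) :
    pvEx array (s ++ [e]) = pvEx array s := by
  unfold pvEx
  congr 1
  apply List.filter_congr
  intro x _
  by_cases hx : x ∈ s
  · simp [hx]
  · have hxe : ¬ x = e := fun h => hx (h ▸ he)
    simp [hx, hxe]

theorem pv_set_contains (s : List Int) (x : Int) :
    PySem.Set.contains (PySem.Set.ofList s) x = s.contains x := by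
  simp [PySem.Set.contains]

theorem pv_ofList_snoc (s : List Int) (e : Int) :
    PySem.Set.ofList (s ++ [e]) = PySem.Set.add (PySem.Set.ofList s) e := by
  rw [PySem.Set.ofList_eq_foldl, PySem.Set.ofList_eq_foldl, List.foldl_append]
  rfl

theorem pv_stepA (array : List Int) (i j : Int) (b : Option (Int × Int)) :
    (let s1 := PySem.List.slice array (some i) (some j)
     let s2 := array.filter (fun x => !(s1.contains x))
     let diff := |s1.sum - s2.sum|
     match (pvF array b).1 with
     | none => (some diff, s1, s2)
     | some m => if diff < m then (some diff, s1, s2) else (pvF array b))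
      = pvF array (pvSel array b i j) := by
  cases b with
  | none => simp [pvF, pvSel, pvD, pvSl, pvEx]
  | some p =>
    simp only [pvF, pvSel, pvD, pvSl, pvEx]
    split_ifs <;> simp

theorem pv_innerA (array : List Int) (i : Int) (L : List Int) (b : Option (Int × Int)) :
    L.foldl (fun st j =>
        let s1 := PySem.List.slice array (some i) (some j)
        let s2 := array.filter (fun x => !(s1.contains x))
        let diff := |s1.sum - s2.sum|
        match st.1 with
        | none => (some diff, s1, s2)
        | some m => if diff < m then (some diff, s1, s2) else st) (pvF array b)
      = pvF array (L.foldl (fun b j => pvSel array b i j) b) := by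
  induction L generalizing b with
  | nil => rfl
  | cons j L ih =>
    simp only [List.foldl_cons]
    rw [pv_stepA array i j b]
    exact ih _

theorem pv_stepH (array : List Int) (i j : Int) (b : Option (Int × Int)) (dv : Int)
    (hdv : dv = pvD array i j) :
    (match pvH array b with
     | none => some (dv, i, j)
     | some t => if dv < t.1 then some (dv, i, j) else pvH array b)
      = pvH array (pvSel array b i j) := by
  subst hdv
  cases b with
  | none => simp [pvH, pvSel]
  | some p =>
    simp only [pvH, pvSel]
    split_ifs <;> simp

theorem pv_innerB (array : List Int) (i : Int) (hi : 0 ≤ i)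
    (count : PySem.Dict Int Int)
    (hc : ∀ v, count.getD v 0 = array.count v)
    (b : Option (Int × Int)) (k : Nat) (hk1 : 1 ≤ k) (hk : i + k ≤ (array.length : Int)) :
    (PySem.List.pyRange (i+1) (i+k) 1).foldl (fun st j =>
        let e := PySem.List.pyGetD array (j-1) 0
        let s1sum := st.2.2.2 + e
        let se : PySem.Set Int × Int :=
          if PySem.Set.contains st.2.1 e then (st.2.1, st.2.2.1)
          else (PySem.Set.add st.2.1 e, st.2.2.1 - count.getD e 0 * e)
        let diff := |s1sum - se.2|
        let best' : Option (Int × Int × Int) :=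
          match st.1 with
          | none => some (diff, i, j)
          | some b => if diff < b.1 then some (diff, i, j) else st.1
        (best', se.1, se.2, s1sum))
      (pvH array b, (PySem.Set.empty : PySem.Set Int), array.sum, (0 : Int))
      = (pvH array ((PySem.List.pyRange (i+1) (i+k) 1).foldl (fun b j => pvSel array b i j) b),
         PySem.Set.ofList (pvSl array i (i+k-1)),
         pvEx array (pvSl array i (i+k-1)),
         (pvSl array i (i+k-1)).sum) := by
  induction k with
  | zero => omega
  | succ k ih =>
    rcases Nat.lt_or_ge k 1 with hk0 | hk0
    · -- k = 0 : base case, range(i+1, i+1) is empty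
      interval_cases k
      have hone : ((i : Int) + ((1:Nat) : Int)) = i + 1 := by push_cast; ring
      have hnil : PySem.List.pyRange (i+1) (i + ((1:Nat):Int)) 1 = [] := by
        rw [hone]; exact PySem.List.pyRange_one_eq_nil (by omega)
      have hsl : pvSl array i (i + ((1:Nat):Int) - 1) = [] := by
        rw [show (i : Int) + ((1:Nat):Int) - 1 = i by push_cast; ring]
        exact pv_sl_empty array i i hi le_rfl hi
      rw [hnil, hsl]
      simp [pvEx, PySem.Set.ofList]
    · -- k ≥ 1 : peel the last index j = i + k
      have hcast : ((k+1 : Nat) : Int) = (k : Int) + 1 := by push_cast; ring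
      rw [hcast] at hk ⊢
      have hrange : PySem.List.pyRange (i+1) (i + ((k:Int)+1)) 1
          = PySem.List.pyRange (i+1) (i + (k:Int)) 1 ++ [i + (k:Int)] := by
        rw [show i + ((k:Int)+1) = (i + (k:Int)) + 1 by ring]
        exact PySem.List.pyRange_one_succ_right (by omega)
      rw [hrange, List.foldl_append, List.foldl_append]
      rw [ih hk0 (by omega)]
      -- now one step at j = i + k
      simp only [List.foldl_cons, List.foldl_nil]
      have hsnoc : pvSl array i (i + (k:Int))
          = pvSl array i (i + (k:Int) - 1) ++ [PySem.List.pyGetD array (i + (k:Int) - 1) 0] := by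
        have := pv_sl_snoc array i (i + (k:Int) - 1) hi (by omega) (by omega)
        rw [show i + (k:Int) - 1 + 1 = i + (k:Int) by ring] at this
        exact this
      set S := pvSl array i (i + (k:Int) - 1) with hS
      set e := PySem.List.pyGetD array (i + (k:Int) - 1) 0 with he
      have hidx : i + ((k:Int)+1) - 1 = i + (k:Int) := by ring
      rw [hidx]
      have hsum : (pvSl array i (i + (k:Int))).sum = S.sum + e := by
        rw [hsnoc, List.sum_append]; simp
      by_cases hmem : e ∈ S
      · have hcont : PySem.Set.contains (PySem.Set.ofList S) e = true := by
          rw [pv_set_contains]; simpa using hmem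
        have hseen : PySem.Set.ofList (pvSl array i (i + (k:Int))) = PySem.Set.ofList S := by
          rw [hsnoc, pv_ofList_snoc]
          simp [PySem.Set.add, hmem]
        have hex : pvEx array (pvSl array i (i + (k:Int))) = pvEx array S := by
          rw [hsnoc]; exact pv_ex_snoc_mem array S e hmem
        simp only [hcont, if_true, Prod.mk.injEq]
        refine ⟨?_, hseen.symm, hex.symm, hsum.symm⟩
        exact pv_stepH array i (i + (k:Int)) _ _ (by rw [pvD, hsum, hex])
      · have hcont : PySem.Set.contains (PySem.Set.ofList S) e = false := by
          rw [pv_set_contains]; simpa using hmem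
        have hseen : PySem.Set.ofList (pvSl array i (i + (k:Int))) = PySem.Set.add (PySem.Set.ofList S) e := by
          rw [hsnoc, pv_ofList_snoc]
        have hex : pvEx array (pvSl array i (i + (k:Int))) = pvEx array S - count.getD e 0 * e := by
          rw [hsnoc, pv_ex_snoc array S e hmem, hc]
        simp only [hcont, Bool.false_eq_true, if_false, Prod.mk.injEq]
        refine ⟨?_, hseen.symm, hex.symm, hsum.symm⟩
        exact pv_stepH array i (i + (k:Int)) _ _ (by rw [pvD, hsum, hex])

theorem pv_outer (array : List Int) (count : PySem.Dict Int Int)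
    (hc : ∀ v, count.getD v 0 = array.count v)
    (L : List Int) (hL : ∀ i ∈ L, 0 ≤ i ∧ i < (array.length : Int)) (b : Option (Int × Int)) :
    (L.foldl (fun st i =>
      (PySem.List.pyRange (i+1) (array.length : Int) 1).foldl (fun st j =>
        let s1 := PySem.List.slice array (some i) (some j)
        let s2 := array.filter (fun x => !(s1.contains x))
        let diff := |s1.sum - s2.sum|
        match st.1 with
        | none => (some diff, s1, s2)
        | some m => if diff < m then (some diff, s1, s2) else st) st) (pvF array b)
      = pvF array (L.foldl (fun b i =>
          (PySem.List.pyRange (i+1) (array.length : Int) 1).foldl (fun b j => pvSel array b i j) b) b))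
    ∧ (L.foldl (fun best i =>
      ((PySem.List.pyRange (i+1) (array.length : Int) 1).foldl (fun st j =>
        let e := PySem.List.pyGetD array (j-1) 0
        let s1sum := st.2.2.2 + e
        let se : PySem.Set Int × Int :=
          if PySem.Set.contains st.2.1 e then (st.2.1, st.2.2.1)
          else (PySem.Set.add st.2.1 e, st.2.2.1 - count.getD e 0 * e)
        let diff := |s1sum - se.2|
        let best' : Option (Int × Int × Int) :=
          match st.1 with
          | none => some (diff, i, j)
          | some b => if diff < b.1 then some (diff, i, j) else st.1
        (best', se.1, se.2, s1sum))
        (best, (PySem.Set.empty : PySem.Set Int), array.sum, (0 : Int))).1) (pvH array b)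
      = pvH array (L.foldl (fun b i =>
          (PySem.List.pyRange (i+1) (array.length : Int) 1).foldl (fun b j => pvSel array b i j) b) b)) := by
  induction L generalizing b with
  | nil => exact ⟨rfl, rfl⟩
  | cons i L ih =>
    have hi0 := (hL i (by simp)).1
    have hin := (hL i (by simp)).2
    have hL' : ∀ x ∈ L, 0 ≤ x ∧ x < (array.length : Int) := fun x hx => hL x (by simp [hx])
    have hk1 : 1 ≤ ((array.length : Int) - i).toNat := by omega
    have hik : i + ((((array.length : Int) - i).toNat : Int)) = (array.length : Int) := by omega
    have hrange : PySem.List.pyRange (i+1) (array.length : Int) 1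
        = PySem.List.pyRange (i+1) (i + ((((array.length : Int) - i).toNat : Int))) 1 := by rw [hik]
    constructor
    · simp only [List.foldl_cons]
      rw [pv_innerA]
      exact (ih hL' _).1
    · simp only [List.foldl_cons]
      rw [hrange,
        pv_innerB array i hi0 count hc b (((array.length : Int) - i).toNat) hk1 (by omega)]
      rw [← hrange]
      exact (ih hL' _).2

-- ===== VERDICT (by name: the statement is the Claim_ definition above) =====
theorem algorithm_h_spec : Claim_equal_algorithm_h := by
  intro array _
  unfold Spec_algorithm_h algorithm_h algorithm_h_alt
  dsimp only
  have hc : ∀ v, (array.foldl (fun d x => d.insert x (d.getD x 0 + 1))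
      (PySem.Dict.empty : PySem.Dict Int Int)).getD v 0 = array.count v := pv_count array
  have hL : ∀ i ∈ PySem.List.pyRange 0 (array.length : Int) 1, 0 ≤ i ∧ i < (array.length : Int) := by
    intro i hi; rw [PySem.List.mem_pyRange_one] at hi; exact hi
  obtain ⟨hA, hB⟩ := pv_outer array _ hc (PySem.List.pyRange 0 (array.length : Int) 1) hL none
  rw [show pvF array none = ((none, [], []) : Option Int × List Int × List Int) from rfl] at hA
  rw [show pvH array none = (none : Option (Int × Int × Int)) from rfl] at hB
  rw [hA, hB]
  cases (PySem.List.pyRange 0 (array.length : Int) 1).foldl (fun b i =>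
      (PySem.List.pyRange (i+1) (array.length : Int) 1).foldl (fun b j => pvSel array b i j) b) none with
  | none => rfl
  | some p =>
    simp only [pvF, pvH, pvSl]
    congr 1
    apply List.filter_congr
    intro x _
    rw [pv_set_contains]
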